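-- pv_equiv track=rewrite | github.com/ritarock/sandbox | old/python/atc/abc250b.py | create_result
-- ===== SOURCE A (Python) =====
-- def create_result(n, block: str):
--     result = ''
--     inversion_block = block.replace('.', '-').replace('#', '.').replace('-', '#')
--     for i in range(1, n+1):
--         if i %2 != 0:
--             result += block
--         else:
--             result += inversion_block
--     return result
-- ===== SOURCE B (Python) =====
-- def create_result(n, block: str):
--     inversion_block = block.replace('.', '-').replace('#', '.').replace('-', '#')
--     m = max(n, 0)
--     return (block + inversion_block) * (m // 2) + (block if m % 2 != 0 else '')
-- ===== Notes on version B (the rewrite author's own statement) =====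
-- stated objective: simpler
-- what changed: Replaces the per-row parity loop with one string multiplication of the paired block+inversion_block repeated m//2 times plus one leftover block when m is odd (m = max(n,0)).
import Mathlib
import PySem

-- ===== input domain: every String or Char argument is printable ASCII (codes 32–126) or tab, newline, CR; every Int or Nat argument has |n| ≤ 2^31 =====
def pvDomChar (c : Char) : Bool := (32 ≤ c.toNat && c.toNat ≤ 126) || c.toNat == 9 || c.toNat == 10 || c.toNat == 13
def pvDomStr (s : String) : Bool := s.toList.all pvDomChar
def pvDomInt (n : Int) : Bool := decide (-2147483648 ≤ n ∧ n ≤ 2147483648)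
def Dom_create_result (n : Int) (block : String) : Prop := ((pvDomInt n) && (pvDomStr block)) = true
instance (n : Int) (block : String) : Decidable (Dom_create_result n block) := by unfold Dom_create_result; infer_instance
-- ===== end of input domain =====

-- ===== PORT A =====
-- B replaces A's per-row parity loop by one repetition of the paired blocks; objective: simpler.
def create_result (n : Int) (block : String) : String :=
  let inversion_block :=
    PySem.Str.replace (PySem.Str.replace (PySem.Str.replace block "." "-") "#" ".") "-" "#"
  let result := (PySem.List.pyRange 1 (n + 1) 1).foldl
    (fun acc i => if PySem.Int.mod i 2 ≠ 0 then acc ++ block.toList else acc ++ inversion_block.toList)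
    ([] : List Char)
  String.ofList result

-- ===== PORT B =====
def create_result_alt (n : Int) (block : String) : String :=
  let inversion_block :=
    PySem.Str.replace (PySem.Str.replace (PySem.Str.replace block "." "-") "#" ".") "-" "#"
  let m := max n 0
  String.ofList
    (PySem.List.pyRepeat (block.toList ++ inversion_block.toList) (PySem.Int.floordiv m 2) ++
      (if PySem.Int.mod m 2 ≠ 0 then block.toList else []))

-- ===== PRECONDITION & SPEC =====
def Spec_create_result (n : Int) (block : String) (out : String) : Prop := out = create_result_alt n block
instance (n : Int) (block : String) (out : String) : Decidable (Spec_create_result n block out) := by unfold Spec_create_result; infer_instance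

-- ===== CLAIM (what is proved, stated in full; the proofs are below) =====
def Claim_equal_create_result : Prop := ∀ (n : Int) (block : String), Dom_create_result n block → Spec_create_result n block (create_result n block)

-- ===== LEMMAS AND PROOFS =====

lemma mod_odd (q : Int) : PySem.Int.mod (2 * q + 1) 2 = 1 := by
  simp [PySem.Int.mod, Int.fmod_eq_emod]

lemma mod_even (q : Int) : PySem.Int.mod (2 * q) 2 = 0 := by
  simp [PySem.Int.mod, Int.fmod_eq_emod]

-- the loop over range(1, 2q+1) produces q copies of s ++ t
lemma loop_pairs (s t : List Char) (q : Nat) (acc : List Char) :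
    (PySem.List.pyRange 1 (2 * (q : Int) + 1) 1).foldl
      (fun acc i => if PySem.Int.mod i 2 ≠ 0 then acc ++ s else acc ++ t) acc
    = acc ++ (List.replicate q (s ++ t)).flatten := by
  induction q generalizing acc with
  | zero => simp [PySem.List.pyRange_one_eq_nil (by omega : (1:Int) ≤ 1)]
  | succ q ih =>
    have h1 : (2 * (((q : Nat) + 1 : Nat) : Int) + 1) = (2 * (q : Int) + 1) + 1 + 1 := by
      omega
    rw [h1, PySem.List.pyRange_one_succ_right (by omega),
        PySem.List.pyRange_one_succ_right (by omega), List.foldl_append, List.foldl_append, ih]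
    simp [List.foldl, List.replicate_succ', PySem.Int.mod, Int.fmod_eq_emod]
    intro h; exact absurd h (by omega)

-- the loop over range(1, 2q+2) produces q copies of s ++ t and a final s
lemma loop_pairs_odd (s t : List Char) (q : Nat) :
    (PySem.List.pyRange 1 (2 * (q : Int) + 1 + 1) 1).foldl
      (fun acc i => if PySem.Int.mod i 2 ≠ 0 then acc ++ s else acc ++ t) []
    = (List.replicate q (s ++ t)).flatten ++ s := by
  rw [PySem.List.pyRange_one_succ_right (by omega), List.foldl_append, loop_pairs]
  simp [List.foldl]

lemma floordiv_two_even (q : Int) : PySem.Int.floordiv (2 * q) 2 = q := by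
  simp [PySem.Int.floordiv, Int.fdiv_eq_ediv]

lemma floordiv_two_odd (q : Int) : PySem.Int.floordiv (2 * q + 1) 2 = q := by
  simp [PySem.Int.floordiv, Int.fdiv_eq_ediv]; omega

theorem create_result_spec : Claim_equal_create_result := by
  intro n block _
  unfold Spec_create_result create_result create_result_alt
  simp only []
  set s := block.toList
  set t := (PySem.Str.replace (PySem.Str.replace (PySem.Str.replace block "." "-") "#" ".") "-" "#").toList
  apply congrArg String.ofList
  rcases le_or_gt n 0 with hn | hn
  · have hm : max n 0 = 0 := by omega
    rw [PySem.List.pyRange_one_eq_nil (by omega), hm]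
    simp [PySem.List.pyRepeat, PySem.Int.floordiv, PySem.Int.mod]
  · have hm : max n 0 = n := by omega
    rw [hm]
    rcases Int.even_or_odd n with ⟨q, hq⟩ | ⟨q, hq⟩
    · have hq2 : n = 2 * q := by omega
      have hq0 : 0 ≤ q := by omega
      lift q to Nat using hq0 with k
      rw [hq2, loop_pairs s t k, floordiv_two_even, mod_even]
      simp [PySem.List.pyRepeat]
    · have hq0 : 0 ≤ q := by omega
      lift q to Nat using hq0 with k
      have hq2 : n + 1 = 2 * (k : Int) + 1 + 1 := by omega
      rw [hq2, loop_pairs_odd s t k, hq, floordiv_two_odd, mod_odd]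
      simp [PySem.List.pyRepeat]
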